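-- pv_equiv track=rewrite | github.com/Aarav0Maz/CCC_2021 | J4.py | min_swaps_to_arrange_books
-- ===== SOURCE A (Python) =====
-- def min_swaps_to_arrange_books(books):
--     l_count, m_count, s_count, swaps = 0, 0, 0, 0
--
--     for book in books:
--         if book =='L':
--             l_count += 1
--             swaps += m_count + l_count + s_count - 1
--         elif book == 'M':
--             m_count += 1
--         elif book == 'S':
--             s_count += 1
--     return swaps
-- ===== SOURCE B (Python) =====
-- def min_swaps_to_arrange_books(books):
--     # Reverse traversal: every L/M/S book must cross each 'L' to its right once.
--     right_l = 0
--     swaps = 0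
--     for book in reversed(books):
--         if book in ('L', 'M', 'S'):
--             swaps += right_l
--             if book == 'L':
--                 right_l += 1
--     return swaps
-- ===== Notes on version B (the rewrite author's own statement) =====
-- stated objective: alternative
-- what changed: Counts the same quantity as the number of (book, later-L) crossing pairs: B scans in reverse keeping only one counter of L's seen so far, adding it for every L/M/S book, instead of A's forward scan with three per-type counters and the m+l+s-1 formula.
import Mathlib
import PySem

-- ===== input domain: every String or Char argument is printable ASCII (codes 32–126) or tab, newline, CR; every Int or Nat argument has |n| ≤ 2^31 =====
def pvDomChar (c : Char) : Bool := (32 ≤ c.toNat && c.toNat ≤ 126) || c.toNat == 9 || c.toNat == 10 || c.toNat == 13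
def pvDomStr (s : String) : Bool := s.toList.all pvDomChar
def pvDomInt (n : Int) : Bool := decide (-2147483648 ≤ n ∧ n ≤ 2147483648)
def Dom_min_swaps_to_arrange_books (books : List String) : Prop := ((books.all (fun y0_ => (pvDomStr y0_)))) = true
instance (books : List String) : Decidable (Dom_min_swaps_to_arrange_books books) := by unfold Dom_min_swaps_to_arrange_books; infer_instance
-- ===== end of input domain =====

-- B replaces A's forward scan with three type-counters by a reverse scan with a single right-L counter (same O(n) cost, different decomposition).


-- ===== PORT A =====
def min_swaps_to_arrange_books (books : List String) : Int :=
  (books.foldl (fun (st : Int × Int × Int × Int) book =>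
      let (l, m, s, sw) := st
      if book = "L" then (l + 1, m, s, sw + (m + (l + 1) + s - 1))
      else if book = "M" then (l, m + 1, s, sw)
      else if book = "S" then (l, m, s + 1, sw)
      else st) (0, 0, 0, 0)).2.2.2

-- ===== PORT B =====
def min_swaps_to_arrange_books_alt (books : List String) : Int :=
  (books.reverse.foldl (fun (st : Int × Int) book =>
      let (r, sw) := st
      if book = "L" ∨ book = "M" ∨ book = "S" then
        ((if book = "L" then r + 1 else r), sw + r)
      else st) (0, 0)).2

-- ===== PRECONDITION & SPEC =====
def Spec_min_swaps_to_arrange_books (books : List String) (out : Int) : Prop := out = min_swaps_to_arrange_books_alt books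
instance (books : List String) (out : Int) : Decidable (Spec_min_swaps_to_arrange_books books out) := by unfold Spec_min_swaps_to_arrange_books; infer_instance

-- ===== CLAIM (what is proved, stated in full; the proofs are below) =====
def Claim_equal_min_swaps_to_arrange_books : Prop := ∀ (books : List String), Dom_min_swaps_to_arrange_books books → Spec_min_swaps_to_arrange_books books (min_swaps_to_arrange_books books)

-- ===== LEMMAS AND PROOFS =====

/-- number of "L" entries, as an Int -/
def pvCntL : List String → Int
  | [] => 0
  | x :: t => pvCntL t + (if x = "L" then 1 else 0)

/-- number of L/M/S entries, as an Int -/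
def pvCntLMS : List String → Int
  | [] => 0
  | x :: t => pvCntLMS t + (if x = "L" ∨ x = "M" ∨ x = "S" then 1 else 0)

/-- the common value: Σ over L/M/S positions of the number of "L"s after them
    (read front-to-back: head pairs with the L-count of the tail) -/
def pvP : List String → Int
  | [] => 0
  | x :: t => pvP t + (if x = "L" ∨ x = "M" ∨ x = "S" then pvCntL t else 0)

/-- rear-to-front reading of the same sum: each "L" pairs with the L/M/S-count after it
    in the processing (reversed) order -/
def pvQ : List String → Int
  | [] => 0
  | x :: t => pvQ t + (if x = "L" then pvCntLMS t else 0)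

theorem pvA_fold (bs : List String) : ∀ (l m s sw : Int),
    (bs.foldl (fun (st : Int × Int × Int × Int) book =>
      let (l, m, s, sw) := st
      if book = "L" then (l + 1, m, s, sw + (m + (l + 1) + s - 1))
      else if book = "M" then (l, m + 1, s, sw)
      else if book = "S" then (l, m, s + 1, sw)
      else st) (l, m, s, sw)).2.2.2
    = sw + pvP bs + (l + m + s) * pvCntL bs := by
  induction bs with
  | nil => intro l m s sw; simp [pvP, pvCntL]
  | cons x t ih =>
    intro l m s sw
    by_cases hL : x = "L"
    · simp [List.foldl, hL, ih, pvP, pvCntL]; ring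
    · by_cases hM : x = "M"
      · simp [List.foldl, hM, ih, pvP, pvCntL]; ring
      · by_cases hS : x = "S"
        · simp [List.foldl, hS, ih, pvP, pvCntL]; ring
        · simp [List.foldl, hL, hM, hS, ih, pvP, pvCntL]

theorem pvB_fold (ys : List String) : ∀ (r sw : Int),
    (ys.foldl (fun (st : Int × Int) book =>
      let (r, sw) := st
      if book = "L" ∨ book = "M" ∨ book = "S" then
        ((if book = "L" then r + 1 else r), sw + r)
      else st) (r, sw)).2
    = sw + pvQ ys + r * pvCntLMS ys := by
  induction ys with
  | nil => intro r sw; simp [pvQ, pvCntLMS]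
  | cons x t ih =>
    intro r sw
    by_cases hL : x = "L"
    · simp [List.foldl, hL, ih, pvQ, pvCntLMS]; ring
    · by_cases hM : x = "M"
      · simp [List.foldl, hM, ih, pvQ, pvCntLMS]; ring
      · by_cases hS : x = "S"
        · simp [List.foldl, hS, ih, pvQ, pvCntLMS]; ring
        · simp [List.foldl, hL, hM, hS, ih, pvQ, pvCntLMS]

theorem pvCntL_append (ys : List String) (x : String) :
    pvCntL (ys ++ [x]) = pvCntL ys + (if x = "L" then 1 else 0) := by
  induction ys with
  | nil => simp [pvCntL]
  | cons y t ih => simp [pvCntL, ih]; ring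

theorem pvCntLMS_append (ys : List String) (x : String) :
    pvCntLMS (ys ++ [x]) = pvCntLMS ys + (if x = "L" ∨ x = "M" ∨ x = "S" then 1 else 0) := by
  induction ys with
  | nil => simp [pvCntLMS]
  | cons y t ih => simp [pvCntLMS, ih]; ring

theorem pvCntL_reverse (bs : List String) : pvCntL bs.reverse = pvCntL bs := by
  induction bs with
  | nil => rfl
  | cons x t ih => simp [List.reverse_cons, pvCntL_append, pvCntL, ih]

theorem pvQ_append (ys : List String) (x : String) :
    pvQ (ys ++ [x]) = pvQ ys + (if x = "L" ∨ x = "M" ∨ x = "S" then pvCntL ys else 0) := by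
  induction ys with
  | nil => simp [pvQ, pvCntL, pvCntLMS]
  | cons y t ih =>
    simp [pvQ, ih, pvCntLMS_append, pvCntL]
    split_ifs <;> simp_all <;> ring

theorem pvQ_reverse (bs : List String) : pvQ bs.reverse = pvP bs := by
  induction bs with
  | nil => rfl
  | cons x t ih => simp [List.reverse_cons, pvQ_append, pvP, ih, pvCntL_reverse]

-- ===== VERDICT (by name: the statement is the Claim_ definition above) =====
theorem min_swaps_to_arrange_books_spec : Claim_equal_min_swaps_to_arrange_books := by
  intro books _
  show min_swaps_to_arrange_books books = min_swaps_to_arrange_books_alt books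
  unfold min_swaps_to_arrange_books min_swaps_to_arrange_books_alt
  rw [pvA_fold, pvB_fold, pvQ_reverse]
  ring
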